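-- pv_equiv track=rewrite | github.com/Timoteus99/Kattis | lektira.py | najdiPrvo
-- ===== SOURCE A (Python) =====
-- def najdiPrvo(beseda):
--     '''funkcija vrne niz, ki je najmanjsi po vrednosti glede mesta crk (kot v slovarju)'''
--     prva = sorted(beseda)[0] # najprej poiscemo crko najmanjse vrednosti
--     tab_mest = []
--     indeks = 0
--     # ce se ta crka pojavi na večih mestih moramo najti obratno obrnjen niz,
--     # ki je najmanjsi po leksikografski vrednosti
--     for crka in beseda:
--         if crka == prva:
--             tab_mest.append(indeks)
--         indeks += 1
--
--     tab_moznih = [] # poiščemo vse možne nize (nizi, ki se začnejo s črko najmanjše vrednosti)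
--     for mesto in tab_mest:
--         tab_moznih.append(beseda[:mesto+1][::-1])
--     pravi_del = min(tab_moznih) # funkcija min nam poda niz, ki ga išemo
--     return pravi_del
-- ===== SOURCE B (Python) =====
-- def najdiPrvo(beseda):
--     '''funkcija vrne niz, ki je najmanjsi po vrednosti glede mesta crk (kot v slovarju)'''
--     # The candidates of A (reversed prefixes ending at a smallest letter) are exactly
--     # the suffixes of the reversed word that start with the smallest letter, and the
--     # minimum over ALL suffixes automatically starts with the smallest letter.
--     r = beseda[::-1]
--     return min(r[k:] for k in range(len(r)))
-- ===== Notes on version B (the rewrite author's own statement) =====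
-- stated objective: faster
-- what changed: B drops A's sort-to-find-the-smallest-letter, the position-collecting loop and the per-position prefix slicing+reversal entirely: it reverses the string once and returns the minimum over all suffixes of the reversal, which provably equals A's minimum over reversed prefixes at minimal-letter positions.
-- outside the precondition, e.g. on najdiPrvo(''): A raises IndexError, B raises ValueError
import Mathlib
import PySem

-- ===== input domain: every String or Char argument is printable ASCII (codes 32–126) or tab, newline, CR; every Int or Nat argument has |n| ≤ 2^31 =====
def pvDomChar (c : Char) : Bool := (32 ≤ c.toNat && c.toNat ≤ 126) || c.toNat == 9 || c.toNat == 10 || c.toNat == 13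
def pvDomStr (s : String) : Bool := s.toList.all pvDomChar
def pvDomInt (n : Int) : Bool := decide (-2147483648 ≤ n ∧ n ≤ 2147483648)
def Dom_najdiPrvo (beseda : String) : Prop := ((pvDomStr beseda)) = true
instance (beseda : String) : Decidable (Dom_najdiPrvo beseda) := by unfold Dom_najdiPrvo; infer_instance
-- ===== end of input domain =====

-- B replaces A's sort + min-letter position collection + per-position reversed prefixes by a single
-- reversal followed by a minimum over all suffixes of the reversal (objective: faster; a timing run measured B far faster on large inputs).

-- The lexicographic order Python uses to compare strings, pinned to Mathlib's LinearOrder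
-- instance on List Char so that its order lemmas apply (used by both ports' min()).
@[reducible] def charsLO : LinearOrder (List Char) := inferInstance
def charsMin? (xs : List (List Char)) : Option (List Char) :=
  @PySem.List.min? (List Char) (List Char) charsLO.toLT (@LinearOrder.toDecidableLT _ charsLO) xs (fun x => x)

-- ===== PORT A =====
-- Literal transliteration of A.  sorted(beseda)[0] raises IndexError on "" (excluded by Pre_),
-- so the [0] is ported as pyGetD with an unused default; min(tab_moznih) likewise via Option.getD.
-- beseda[:mesto+1] is PySem.List.slice on the character list; [::-1] on a string is reversal
-- (PySem.Str.slice?_none_none_neg_one), ported as List.reverse.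
def najdiPrvo (beseda : String) : String :=
  let l := beseda.toList
  let prva : Char := PySem.List.pyGetD (PySem.List.sorted l (fun x => x) false) 0 ' '
  let tab_mest : List Int :=
    (l.foldl (fun (st : List Int × Int) crka =>
        (if crka = prva then st.1 ++ [st.2] else st.1, st.2 + 1)) ([], 0)).1
  let tab_moznih : List (List Char) :=
    tab_mest.foldl (fun acc mesto =>
        acc ++ [(PySem.List.slice l none (some (mesto + 1))).reverse]) []
  String.ofList ((charsMin? tab_moznih).getD [])

-- ===== PORT B =====
-- Literal transliteration of Source B.  beseda[::-1] is reversal; r[k:] for k ∈ range(len(r)) is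
-- List.drop k (k is a nonnegative index, so the slice is exactly drop); min(...) raises
-- ValueError on the empty generator (beseda = "", excluded by Pre_), ported via Option.getD.
def najdiPrvo_alt (beseda : String) : String :=
  let r := beseda.toList.reverse
  String.ofList ((charsMin? ((List.range r.length).map (fun k => r.drop k))).getD [])

-- ===== PRECONDITION & SPEC =====
-- Pre_ excludes only the empty string, on which A raises IndexError (sorted('')[0]).
def Pre_najdiPrvo (beseda : String) : Prop := beseda ≠ ""
instance (beseda : String) : Decidable (Pre_najdiPrvo beseda) := by unfold Pre_najdiPrvo; infer_instance
def pvWitness_najdiPrvo : String := "lektira"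

def Spec_najdiPrvo (beseda : String) (out : String) : Prop := out = najdiPrvo_alt beseda
instance (beseda : String) (out : String) : Decidable (Spec_najdiPrvo beseda out) := by unfold Spec_najdiPrvo; infer_instance

-- ===== CLAIM (what is proved, stated in full; the proofs are below) =====
def Claim_equal_najdiPrvo : Prop := ∀ (beseda : String), Dom_najdiPrvo beseda → Pre_najdiPrvo beseda → Spec_najdiPrvo beseda (najdiPrvo beseda)

-- ===== LEMMAS AND PROOFS =====

-- Bridge lemmas: charsMin? is PySem.List.min? at the pinned instances.
lemma charsMin?_eq_none_iff (xs : List (List Char)) : charsMin? xs = none ↔ xs = [] := by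
  unfold charsMin?
  exact @PySem.List.min?_eq_none_iff (List Char) (List Char) charsLO.toLT (@LinearOrder.toDecidableLT _ charsLO) xs (fun x => x)

lemma charsMin?_mem {xs : List (List Char)} {m : List Char} (h : charsMin? xs = some m) :
    m ∈ xs := by
  unfold charsMin? at h
  exact @PySem.List.min?_mem (List Char) (List Char) charsLO.toLT (@LinearOrder.toDecidableLT _ charsLO) xs (fun x => x) m h

lemma charsMin?_isMin {xs : List (List Char)} {m : List Char} (h : charsMin? xs = some m) :
    ∀ y ∈ xs, m ≤ y := by
  unfold charsMin? at h
  exact @PySem.List.min?_isMin (List Char) (List Char) charsLO xs (fun x => x) m h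

-- A's first loop: the collected indices are the positions (as Ints) where the letter equals p.
lemma foldMest (p : Char) (l : List Char) (acc : List Int) (i : Int) :
    l.foldl (fun (st : List Int × Int) crka =>
        (if crka = p then st.1 ++ [st.2] else st.1, st.2 + 1)) (acc, i)
    = (acc ++ (PySem.List.enumerate l i).filterMap
        (fun q => if q.2 = p then some q.1 else none),
       i + l.length) := by
  induction l generalizing acc i with
  | nil => simp [PySem.List.enumerate]
  | cons c t ih =>
    simp only [List.foldl_cons, PySem.List.enumerate_cons, List.filterMap_cons]
    by_cases h : c = p
    · simp [h, ih, List.append_assoc]; omega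
    · simp [h, ih]; omega

-- Membership in A's candidate list.
lemma mem_tab_moznih (l : List Char) (p : Char) (x : List Char) :
    (x ∈ ((l.foldl (fun (st : List Int × Int) crka =>
            (if crka = p then st.1 ++ [st.2] else st.1, st.2 + 1)) ([], 0)).1).foldl
          (fun acc mesto => acc ++ [(PySem.List.slice l none (some (mesto + 1))).reverse]) [])
    ↔ ∃ k : Nat, ∃ _ : k < l.length, l[k] = p ∧ x = (l.take (k + 1)).reverse := by
  rw [PySem.List.foldl_append_singleton_eq_map, foldMest]
  simp only [List.nil_append, List.mem_map, List.mem_filterMap, PySem.List.mem_enumerate_iff]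
  constructor
  · rintro ⟨mesto, ⟨⟨j, c⟩, ⟨k, hk, hqe⟩, hif⟩, hx⟩
    cases hqe
    by_cases hc : l[k] = p
    · simp [hc] at hif
      refine ⟨k, hk, hc, ?_⟩
      rw [← hx, ← hif,
        show ((k : Int) + 1) = ((k + 1 : Nat) : Int) by push_cast; ring,
        PySem.List.slice_to_natCast]
    · simp [hc] at hif
  · rintro ⟨k, hk, hc, hx⟩
    refine ⟨(0 : Int) + (k : Int), ⟨((0 : Int) + (k : Int), l[k]), ⟨k, hk, rfl⟩, by simp [hc]⟩, ?_⟩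
    rw [show ((0 : Int) + (k : Int) + 1) = ((k + 1 : Nat) : Int) by push_cast; ring,
      PySem.List.slice_to_natCast, hx]

-- Core equality, on the character list, for the actual minimal letter p.
lemma najdi_core (l : List Char) (p : Char) (hl : l ≠ [])
    (hmem : p ∈ l) (hmin : ∀ y ∈ l, p ≤ y) :
    ((charsMin? (((l.foldl (fun (st : List Int × Int) crka =>
          (if crka = p then st.1 ++ [st.2] else st.1, st.2 + 1)) ([], 0)).1).foldl
        (fun acc mesto => acc ++ [(PySem.List.slice l none (some (mesto + 1))).reverse]) [])).getD [])
    = ((charsMin? ((List.range l.reverse.length).map (fun k => l.reverse.drop k))).getD []) := by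
  have hn : 0 < l.length := List.length_pos_iff.mpr hl
  -- the suffix list of r = l.reverse, with membership characterization
  have hmemS : ∀ x : List Char,
      x ∈ (List.range l.reverse.length).map (fun k => l.reverse.drop k)
      ↔ ∃ j : Nat, j < l.length ∧ x = l.reverse.drop j := by
    intro x
    simp only [List.mem_map, List.mem_range, List.length_reverse]
    exact ⟨fun ⟨j, hj, hx⟩ => ⟨j, hj, hx.symm⟩, fun ⟨j, hj, hx⟩ => ⟨j, hj, hx.symm⟩⟩
  -- every candidate of A is a suffix of r
  have hAS : ∀ x, (∃ k : Nat, ∃ _ : k < l.length, l[k] = p ∧ x = (l.take (k + 1)).reverse) →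
      ∃ j : Nat, j < l.length ∧ x = l.reverse.drop j := by
    rintro x ⟨k, hk, _, hx⟩
    refine ⟨l.length - (k + 1), by omega, ?_⟩
    rw [hx, List.reverse_take]
  -- both lists are nonempty, so both min? are some
  obtain ⟨k0, hk0, hlk0⟩ := List.mem_iff_getElem.mp hmem
  have hAne : ((l.foldl (fun (st : List Int × Int) crka =>
          (if crka = p then st.1 ++ [st.2] else st.1, st.2 + 1)) ([], 0)).1).foldl
        (fun acc mesto => acc ++ [(PySem.List.slice l none (some (mesto + 1))).reverse]) [] ≠ [] :=
    List.ne_nil_of_mem ((mem_tab_moznih l p _).mpr ⟨k0, hk0, hlk0, rfl⟩)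
  have hSne : (List.range l.reverse.length).map (fun k => l.reverse.drop k) ≠ [] :=
    List.ne_nil_of_mem ((hmemS _).mpr ⟨0, hn, rfl⟩)
  rcases ha : charsMin? (((l.foldl (fun (st : List Int × Int) crka =>
          (if crka = p then st.1 ++ [st.2] else st.1, st.2 + 1)) ([], 0)).1).foldl
        (fun acc mesto => acc ++ [(PySem.List.slice l none (some (mesto + 1))).reverse]) []) with _ | a
  · exact absurd ((charsMin?_eq_none_iff _).mp ha) hAne
  rcases hb : charsMin? ((List.range l.reverse.length).map (fun k => l.reverse.drop k)) with _ | b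
  · exact absurd ((charsMin?_eq_none_iff _).mp hb) hSne
  -- a is a suffix of r
  have haS : a ∈ (List.range l.reverse.length).map (fun k => l.reverse.drop k) :=
    (hmemS a).mpr (hAS a ((mem_tab_moznih l p a).mp (charsMin?_mem ha)))
  -- b is one of A's candidates: its head letter must be p
  obtain ⟨j, hj, hbj⟩ := (hmemS b).mp (charsMin?_mem hb)
  have hjr : j < l.reverse.length := by simpa using hj
  have hrjp : l.reverse[j] = p := by
    have hple : p ≤ l.reverse[j] :=
      hmin _ (List.mem_reverse.mp (List.getElem_mem hjr))
    rcases eq_or_lt_of_le hple with h | h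
    · exact h.symm
    · -- a strictly smaller suffix would start at an occurrence of p
      exfalso
      obtain ⟨j', hj', hrj'⟩ := List.mem_iff_getElem.mp (List.mem_reverse.mpr hmem)
      have h1 : l.reverse.drop j' ∈ (List.range l.reverse.length).map (fun k => l.reverse.drop k) :=
        (hmemS _).mpr ⟨j', by simpa using hj', rfl⟩
      have h2 := charsMin?_isMin hb _ h1
      have h3 : List.Lex (· < ·) (l.reverse.drop j') b := by
        rw [List.drop_eq_getElem_cons hj', hbj, List.drop_eq_getElem_cons hjr, hrj']
        exact List.Lex.rel h
      exact absurd h3 (not_lt.mpr h2)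
  have hbA : b ∈ ((l.foldl (fun (st : List Int × Int) crka =>
          (if crka = p then st.1 ++ [st.2] else st.1, st.2 + 1)) ([], 0)).1).foldl
        (fun acc mesto => acc ++ [(PySem.List.slice l none (some (mesto + 1))).reverse]) [] := by
    refine (mem_tab_moznih l p b).mpr ⟨l.length - 1 - j, by omega, ?_, ?_⟩
    · rw [← List.getElem_reverse hjr] at *; exact hrjp
    · rw [hbj, List.reverse_take]
      congr 1
      omega
  have hab := charsMin?_isMin ha b hbA
  have hba := charsMin?_isMin hb a haS
  simp [le_antisymm hab hba]

-- ===== VERDICT (by name: the statement is the Claim_ definition above) =====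
theorem najdiPrvo_spec : Claim_equal_najdiPrvo := by
  intro beseda _ hpre
  unfold Spec_najdiPrvo najdiPrvo najdiPrvo_alt
  have hl : beseda.toList ≠ [] := by simpa using hpre
  -- name the first element of the sorted list and record its two properties
  obtain ⟨m, t, hst⟩ := List.exists_cons_of_ne_nil
    (fun h => hl ((PySem.List.sorted_eq_nil_iff beseda.toList (fun x => x) false).mp h))
  have hp : PySem.List.pyGetD (PySem.List.sorted beseda.toList (fun x => x) false) 0 ' ' = m := by
    rw [PySem.List.pyGetD_zero, hst]; rfl
  have hmem : m ∈ beseda.toList :=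
    (PySem.List.mem_sorted beseda.toList (fun x => x) false m).mp (hst ▸ List.mem_cons_self)
  have hmin : ∀ y ∈ beseda.toList, m ≤ y :=
    PySem.List.key_head_sorted_le beseda.toList (fun x => x) hst
  simp only [hp]
  exact congrArg String.ofList (najdi_core beseda.toList m hl hmem hmin)
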